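-- pv_equiv track=rewrite | github.com/transformixdeploy/Transformellica_CRM | flask_digital_analysis/gpt_insights_service.py | format_competitive_suggestions_for_display
-- ===== SOURCE A (Python) =====
-- from typing import Dict, List, Optional, Any
--
-- def format_competitive_suggestions_for_display(suggestions: List[Dict[str, str]]) -> str:
--     """Format competitive suggestions for better display"""
--     if not suggestions:
--         return "No competitive suggestions available."
--
--     formatted_output = "## 🎯 Competitive Analysis Strategy\n\n"
--
--     # Group by priority
--     high_priority = [s for s in suggestions if s.get('priority', '').upper() == 'HIGH']
--     medium_priority = [s for s in suggestions if s.get('priority', '').upper() == 'MEDIUM']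
--     low_priority = [s for s in suggestions if s.get('priority', '').upper() == 'LOW']
--
--     priority_groups = [
--         ("🔴 HIGH PRIORITY", high_priority),
--         ("🟡 MEDIUM PRIORITY", medium_priority),
--         ("🟢 LOW PRIORITY", low_priority)
--     ]
--
--     for priority_label, group in priority_groups:
--         if group:
--             formatted_output += f"### {priority_label}\n\n"
--
--             for i, suggestion in enumerate(group, 1):
--                 formatted_output += f"**{i}. {suggestion.get('title', 'Untitled Suggestion')}**\n"
--                 formatted_output += f"*Category: {suggestion.get('category', 'General')}*\n\n"
--
--                 formatted_output += f"**🎯 Specific Action:** {suggestion.get('specific_action', 'No action specified')}\n\n"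
--                 formatted_output += f"**📊 What to Track:** {suggestion.get('what_to_track', 'No tracking specified')}\n\n"
--                 formatted_output += f"**💡 Expected Impact:** {suggestion.get('expected_impact', 'No impact specified')}\n\n"
--                 formatted_output += f"**⏰ Timeline:** {suggestion.get('timeline', 'No timeline specified')}\n\n"
--                 formatted_output += f"**🛠️ Tools Needed:** {suggestion.get('tools_needed', 'No tools specified')}\n\n"
--
--                 formatted_output += "---\n\n"
--
--     return formatted_output
-- ===== SOURCE B (Python) =====
-- def _block(i, s):
--     return (f"**{i}. {s.get('title', 'Untitled Suggestion')}**\n"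
--             f"*Category: {s.get('category', 'General')}*\n\n"
--             f"**\U0001F3AF Specific Action:** {s.get('specific_action', 'No action specified')}\n\n"
--             f"**\U0001F4CA What to Track:** {s.get('what_to_track', 'No tracking specified')}\n\n"
--             f"**\U0001F4A1 Expected Impact:** {s.get('expected_impact', 'No impact specified')}\n\n"
--             f"**\u23F0 Timeline:** {s.get('timeline', 'No timeline specified')}\n\n"
--             f"**\U0001F6E0\uFE0F Tools Needed:** {s.get('tools_needed', 'No tools specified')}\n\n"
--             "---\n\n")
--
--
-- def format_competitive_suggestions_for_display(suggestions):
--     """Fused one-pass formatting: each suggestion is rendered to markdown the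
--     moment it is seen, appended to its priority's section text with a per-section
--     counter; no intermediate grouped lists are ever built."""
--     if not suggestions:
--         return "No competitive suggestions available."
--
--     high_n = med_n = low_n = 0
--     high_s = med_s = low_s = ""
--     for s in suggestions:
--         p = s.get('priority', '').upper()
--         if p == 'HIGH':
--             high_n += 1
--             high_s += _block(high_n, s)
--         elif p == 'MEDIUM':
--             med_n += 1
--             med_s += _block(med_n, s)
--         elif p == 'LOW':
--             low_n += 1
--             low_s += _block(low_n, s)
--
--     out = "## \U0001F3AF Competitive Analysis Strategy\n\n"
--     if high_n:
--         out += "### \U0001F534 HIGH PRIORITY\n\n" + high_s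
--     if med_n:
--         out += "### \U0001F7E1 MEDIUM PRIORITY\n\n" + med_s
--     if low_n:
--         out += "### \U0001F7E2 LOW PRIORITY\n\n" + low_s
--     return out
-- ===== Notes on version B (the rewrite author's own statement) =====
-- stated objective: alternative
-- what changed: Replaces A's group-then-format structure (three filtering scans producing bucket lists, then an emit loop over the buckets) with a fused single pass that renders each suggestion to markdown immediately on sight, appending it to a per-priority section string with its own running counter, so no grouped lists exist; the result is assembled from the header plus the three pre-rendered section strings.
import Mathlib
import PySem

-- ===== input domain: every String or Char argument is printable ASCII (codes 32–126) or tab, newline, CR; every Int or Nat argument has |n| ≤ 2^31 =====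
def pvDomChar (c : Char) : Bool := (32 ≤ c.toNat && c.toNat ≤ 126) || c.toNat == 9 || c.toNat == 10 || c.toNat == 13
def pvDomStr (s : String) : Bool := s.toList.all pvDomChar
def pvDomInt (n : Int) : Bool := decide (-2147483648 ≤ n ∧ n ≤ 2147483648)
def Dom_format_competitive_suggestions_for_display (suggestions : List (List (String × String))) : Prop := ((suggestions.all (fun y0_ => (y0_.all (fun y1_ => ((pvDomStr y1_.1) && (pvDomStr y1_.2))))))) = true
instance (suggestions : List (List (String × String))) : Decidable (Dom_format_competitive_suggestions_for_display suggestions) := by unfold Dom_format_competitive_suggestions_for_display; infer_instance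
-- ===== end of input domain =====

-- B replaces A's group-then-format (three filtering scans into bucket lists, then an emit
-- loop) with ONE fused pass that renders each suggestion into its priority's section string
-- with a running counter; no grouped lists exist (alternative decomposition).

-- ===== PORT A =====
-- s.get(k, dflt) on a dict given as an association list (first match)
def sugGet (s : List (String × String)) (k dflt : String) : String :=
  match s.find? (fun kv => kv.1 == k) with
  | some kv => kv.2
  | none => dflt

-- body of A's inner 'for i, suggestion in enumerate(group, 1)' loop (the eight '+=' steps)
def fcsItemStepA (out : String) (p : Int × List (String × String)) : String :=
  let out := out ++ "**" ++ PySem.Int.toStr p.1 ++ ". " ++ sugGet p.2 "title" "Untitled Suggestion" ++ "**\n"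
  let out := out ++ "*Category: " ++ sugGet p.2 "category" "General" ++ "*\n\n"
  let out := out ++ "**🎯 Specific Action:** " ++ sugGet p.2 "specific_action" "No action specified" ++ "\n\n"
  let out := out ++ "**📊 What to Track:** " ++ sugGet p.2 "what_to_track" "No tracking specified" ++ "\n\n"
  let out := out ++ "**💡 Expected Impact:** " ++ sugGet p.2 "expected_impact" "No impact specified" ++ "\n\n"
  let out := out ++ "**⏰ Timeline:** " ++ sugGet p.2 "timeline" "No timeline specified" ++ "\n\n"
  let out := out ++ "**🛠️ Tools Needed:** " ++ sugGet p.2 "tools_needed" "No tools specified" ++ "\n\n"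
  out ++ "---\n\n"

-- body of A's 'for priority_label, group in priority_groups' loop
def fcsGroupStepA (out : String) (lg : String × List (List (String × String))) : String :=
  if !lg.2.isEmpty then
    (PySem.List.enumerate lg.2 1).foldl fcsItemStepA (out ++ "### " ++ lg.1 ++ "\n\n")
  else out

def format_competitive_suggestions_for_display (suggestions : List (List (String × String))) : String :=
  if suggestions.isEmpty then "No competitive suggestions available."
  else
    let formatted_output := "## 🎯 Competitive Analysis Strategy\n\n"
    let high_priority := suggestions.filter (fun s => PySem.Str.upper (sugGet s "priority" "") == "HIGH")
    let medium_priority := suggestions.filter (fun s => PySem.Str.upper (sugGet s "priority" "") == "MEDIUM")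
    let low_priority := suggestions.filter (fun s => PySem.Str.upper (sugGet s "priority" "") == "LOW")
    let priority_groups := [("🔴 HIGH PRIORITY", high_priority), ("🟡 MEDIUM PRIORITY", medium_priority), ("🟢 LOW PRIORITY", low_priority)]
    priority_groups.foldl fcsGroupStepA formatted_output

-- ===== PORT B =====
-- Source B's _block(i, s): one suggestion rendered as a single markdown block
def fcsBlock (i : Int) (s : List (String × String)) : String :=
  "**" ++ PySem.Int.toStr i ++ ". " ++ sugGet s "title" "Untitled Suggestion" ++ "**\n" ++
  "*Category: " ++ sugGet s "category" "General" ++ "*\n\n" ++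
  "**🎯 Specific Action:** " ++ sugGet s "specific_action" "No action specified" ++ "\n\n" ++
  "**📊 What to Track:** " ++ sugGet s "what_to_track" "No tracking specified" ++ "\n\n" ++
  "**💡 Expected Impact:** " ++ sugGet s "expected_impact" "No impact specified" ++ "\n\n" ++
  "**⏰ Timeline:** " ++ sugGet s "timeline" "No timeline specified" ++ "\n\n" ++
  "**🛠️ Tools Needed:** " ++ sugGet s "tools_needed" "No tools specified" ++ "\n\n" ++
  "---\n\n"

-- Source B's fused loop body: state = ((high_n, high_s), (med_n, med_s), (low_n, low_s))
def fcsFuse (st : (Int × String) × (Int × String) × (Int × String))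
    (s : List (String × String)) : (Int × String) × (Int × String) × (Int × String) :=
  let p := PySem.Str.upper (sugGet s "priority" "")
  if p == "HIGH" then ((st.1.1 + 1, st.1.2 ++ fcsBlock (st.1.1 + 1) s), st.2.1, st.2.2)
  else if p == "MEDIUM" then (st.1, (st.2.1.1 + 1, st.2.1.2 ++ fcsBlock (st.2.1.1 + 1) s), st.2.2)
  else if p == "LOW" then (st.1, st.2.1, (st.2.2.1 + 1, st.2.2.2 ++ fcsBlock (st.2.2.1 + 1) s))
  else st

def format_competitive_suggestions_for_display_alt (suggestions : List (List (String × String))) : String :=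
  if suggestions.isEmpty then "No competitive suggestions available."
  else
    let st := suggestions.foldl fcsFuse ((0, ""), (0, ""), (0, ""))
    let out := "## 🎯 Competitive Analysis Strategy\n\n"
    let out := if st.1.1 ≠ 0 then out ++ "### 🔴 HIGH PRIORITY\n\n" ++ st.1.2 else out
    let out := if st.2.1.1 ≠ 0 then out ++ "### 🟡 MEDIUM PRIORITY\n\n" ++ st.2.1.2 else out
    if st.2.2.1 ≠ 0 then out ++ "### 🟢 LOW PRIORITY\n\n" ++ st.2.2.2 else out

-- ===== PRECONDITION & SPEC =====
def Spec_format_competitive_suggestions_for_display (suggestions : List (List (String × String))) (out : String) : Prop := out = format_competitive_suggestions_for_display_alt suggestions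
instance (suggestions : List (List (String × String))) (out : String) : Decidable (Spec_format_competitive_suggestions_for_display suggestions out) := by unfold Spec_format_competitive_suggestions_for_display; infer_instance

-- ===== CLAIM =====
def Claim_equal_format_competitive_suggestions_for_display : Prop := ∀ (suggestions : List (List (String × String))), Dom_format_competitive_suggestions_for_display suggestions → Spec_format_competitive_suggestions_for_display suggestions (format_competitive_suggestions_for_display suggestions)

-- ===== LEMMAS AND PROOFS =====

theorem str_empty_append (s : String) : "" ++ s = s := by
  apply String.toList_injective; simp

def fcsF (acc : String) (q : Int × List (String × String)) : String := acc ++ fcsBlock q.1 q.2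

theorem fcs_fold_acc (l : List (Int × List (String × String))) (acc : String) :
    l.foldl fcsF acc = acc ++ l.foldl fcsF "" := by
  induction l generalizing acc with
  | nil => apply String.toList_injective; simp
  | cons q t ih =>
      simp only [List.foldl_cons]
      rw [ih (fcsF acc q), ih (fcsF "" q)]
      simp only [fcsF, str_empty_append, String.append_assoc]

def fcsFilt (p : String) (l : List (List (String × String))) : List (List (String × String)) :=
  l.filter (fun s => PySem.Str.upper (sugGet s "priority" "") == p)

-- the markdown text of one group rendered with counters starting at n+1
def fcsSect (n : Int) (g : List (List (String × String))) : String :=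
  (PySem.List.enumerate g (n + 1)).foldl fcsF ""

theorem fcsSect_cons (n : Int) (s : List (String × String)) (g : List (List (String × String))) :
    fcsSect n (s :: g) = fcsBlock (n + 1) s ++ fcsSect (n + 1) g := by
  simp only [fcsSect, PySem.List.enumerate_cons, List.foldl_cons]
  rw [fcs_fold_acc]
  simp [fcsF, str_empty_append]

-- invariant of Source B's fused pass: counters count the filters, sections are the rendered filters
theorem fcs_fuse_inv (l : List (List (String × String)))
    (nH nM nL : Int) (sH sM sL : String) :
    l.foldl fcsFuse ((nH, sH), (nM, sM), (nL, sL))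
    = ((nH + (fcsFilt "HIGH" l).length, sH ++ fcsSect nH (fcsFilt "HIGH" l)),
       (nM + (fcsFilt "MEDIUM" l).length, sM ++ fcsSect nM (fcsFilt "MEDIUM" l)),
       (nL + (fcsFilt "LOW" l).length, sL ++ fcsSect nL (fcsFilt "LOW" l))) := by
  induction l generalizing nH nM nL sH sM sL with
  | nil =>
      simp only [List.foldl_nil, fcsFilt, List.filter_nil, List.length_nil]
      have hs : ∀ n : Int, fcsSect n [] = "" := by
        intro n; apply String.toList_injective; simp [fcsSect]
      simp [hs]
  | cons s t ih =>
      simp only [List.foldl_cons]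
      by_cases hH : PySem.Str.upper (sugGet s "priority" "") = "HIGH"
      · have hst : fcsFuse ((nH, sH), (nM, sM), (nL, sL)) s
            = ((nH + 1, sH ++ fcsBlock (nH + 1) s), (nM, sM), (nL, sL)) := by
          simp [fcsFuse, hH]
        have hfH : fcsFilt "HIGH" (s :: t) = s :: fcsFilt "HIGH" t := by simp [fcsFilt, hH]
        have hfM : fcsFilt "MEDIUM" (s :: t) = fcsFilt "MEDIUM" t := by simp [fcsFilt, hH]
        have hfL : fcsFilt "LOW" (s :: t) = fcsFilt "LOW" t := by simp [fcsFilt, hH]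
        rw [hst, ih, hfH, hfM, hfL, fcsSect_cons]
        refine congrArg₂ _ (congrArg₂ _ ?_ ?_) rfl
        · simp only [List.length_cons]; push_cast; ring
        · simp [String.append_assoc]
      · by_cases hM : PySem.Str.upper (sugGet s "priority" "") = "MEDIUM"
        · have hst : fcsFuse ((nH, sH), (nM, sM), (nL, sL)) s
              = ((nH, sH), (nM + 1, sM ++ fcsBlock (nM + 1) s), (nL, sL)) := by
            simp [fcsFuse, hH, hM]
          have hfH : fcsFilt "HIGH" (s :: t) = fcsFilt "HIGH" t := by simp [fcsFilt, hM]
          have hfM : fcsFilt "MEDIUM" (s :: t) = s :: fcsFilt "MEDIUM" t := by simp [fcsFilt, hM]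
          have hfL : fcsFilt "LOW" (s :: t) = fcsFilt "LOW" t := by simp [fcsFilt, hM]
          rw [hst, ih, hfH, hfM, hfL, fcsSect_cons]
          refine congrArg₂ _ rfl (congrArg₂ _ (congrArg₂ _ ?_ ?_) rfl)
          · simp only [List.length_cons]; push_cast; ring
          · simp [String.append_assoc]
        · by_cases hL : PySem.Str.upper (sugGet s "priority" "") = "LOW"
          · have hst : fcsFuse ((nH, sH), (nM, sM), (nL, sL)) s
                = ((nH, sH), (nM, sM), (nL + 1, sL ++ fcsBlock (nL + 1) s)) := by
              simp [fcsFuse, hH, hM, hL]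
            have hfH : fcsFilt "HIGH" (s :: t) = fcsFilt "HIGH" t := by simp [fcsFilt, hL]
            have hfM : fcsFilt "MEDIUM" (s :: t) = fcsFilt "MEDIUM" t := by simp [fcsFilt, hL]
            have hfL : fcsFilt "LOW" (s :: t) = s :: fcsFilt "LOW" t := by simp [fcsFilt, hL]
            rw [hst, ih, hfH, hfM, hfL, fcsSect_cons]
            refine congrArg₂ _ rfl (congrArg₂ _ rfl (congrArg₂ _ ?_ ?_))
            · simp only [List.length_cons]; push_cast; ring
            · simp [String.append_assoc]
          · have hst : fcsFuse ((nH, sH), (nM, sM), (nL, sL)) s = ((nH, sH), (nM, sM), (nL, sL)) := by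
              simp [fcsFuse, hH, hM, hL]
            have hfH : fcsFilt "HIGH" (s :: t) = fcsFilt "HIGH" t := by simp [fcsFilt, hH]
            have hfM : fcsFilt "MEDIUM" (s :: t) = fcsFilt "MEDIUM" t := by simp [fcsFilt, hM]
            have hfL : fcsFilt "LOW" (s :: t) = fcsFilt "LOW" t := by simp [fcsFilt, hL]
            rw [hst, ih, hfH, hfM, hfL]

-- A's inner loop is fcsSect 0 (counters start at 1)
theorem fcs_itemA_eq_sect (g : List (List (String × String))) (acc : String) :
    (PySem.List.enumerate g 1).foldl fcsItemStepA acc = acc ++ fcsSect 0 g := by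
  have h : fcsItemStepA = fcsF := by
    funext out p
    simp [fcsItemStepA, fcsF, fcsBlock, String.append_assoc]
  rw [h, fcs_fold_acc]
  simp only [fcsSect, zero_add]

-- A's group step, characterised
theorem fcs_groupA (out : String) (lg : String × List (List (String × String))) :
    fcsGroupStepA out lg
    = if lg.2.isEmpty then out else out ++ ("### " ++ lg.1 ++ "\n\n") ++ fcsSect 0 lg.2 := by
  cases hE : lg.2.isEmpty
  · simp only [fcsGroupStepA, hE, Bool.not_false, if_true, Bool.false_eq_true, if_false]
    rw [fcs_itemA_eq_sect]
    simp [String.append_assoc]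
  · simp [fcsGroupStepA, hE]

theorem fcs_if_len (g : List (List (String × String))) (a b : String) :
    (if ((0 : Int) + (g.length : Int) ≠ 0) then a else b) = if g.isEmpty then b else a := by
  cases g with
  | nil => simp
  | cons x t =>
      have hne : ((0 : Int) + ((x :: t).length : Int) ≠ 0) := by
        simp only [List.length_cons]; push_cast; omega
      rw [if_pos hne]; simp

-- ===== VERDICT =====
theorem format_competitive_suggestions_for_display_spec : Claim_equal_format_competitive_suggestions_for_display := by
  intro suggestions _
  unfold Spec_format_competitive_suggestions_for_display
  unfold format_competitive_suggestions_for_display format_competitive_suggestions_for_display_alt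
  cases suggestions.isEmpty
  · simp only [Bool.false_eq_true, if_false]
    rw [fcs_fuse_inv]
    simp only [List.foldl_cons, List.foldl_nil, fcs_groupA, fcs_if_len, str_empty_append]
    have lab1 : ("### " ++ "🔴 HIGH PRIORITY" ++ "\n\n") = "### 🔴 HIGH PRIORITY\n\n" := by
      apply String.toList_injective; simp
    have lab2 : ("### " ++ "🟡 MEDIUM PRIORITY" ++ "\n\n") = "### 🟡 MEDIUM PRIORITY\n\n" := by
      apply String.toList_injective; simp
    have lab3 : ("### " ++ "🟢 LOW PRIORITY" ++ "\n\n") = "### 🟢 LOW PRIORITY\n\n" := by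
      apply String.toList_injective; simp
    rw [lab1, lab2, lab3]
    cases hH : (fcsFilt "HIGH" suggestions).isEmpty <;>
      cases hM : (fcsFilt "MEDIUM" suggestions).isEmpty <;>
        cases hL : (fcsFilt "LOW" suggestions).isEmpty <;>
          simp only [fcsFilt] at hH hM hL <;>
          simp [fcsFilt, hH, hM, hL, String.append_assoc]
  · simp
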